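-- pv_equiv track=rewrite | github.com/nur-ag/IGEL | gnnml-comparisons/wl.py | bijective_mapping
-- ===== SOURCE A (Python) =====
-- from collections import defaultdict
--
-- def bijective_mapping(a, b):
--     mapping = defaultdict(set)
--     for i, j in zip(a, b):
--         mapping[i].add(j)
--     a_values = set(a)
--     b_values = set(b)
--     matching_cardinality = len(a_values) == len(b_values)
--     mappings_are_one_to_one = all([len(l) == 1 for l in mapping.values()])
--     return matching_cardinality and mappings_are_one_to_one
-- ===== SOURCE B (Python) =====
-- def _distinct_sorted(xs):
--     # xs is sorted: number of distinct values = length minus adjacent-equal neighbours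
--     return len(xs) - sum(1 for p, q in zip(xs, xs[1:]) if p == q)
--
--
-- def bijective_mapping(a, b):
--     # sort-then-scan: group equal keys by sorting the zipped pairs instead of a dict of sets
--     pairs = sorted(zip(a, b), key=lambda p: p[0])
--     one_to_one = all(p[0] != q[0] or p[1] == q[1] for p, q in zip(pairs, pairs[1:]))
--     return one_to_one and _distinct_sorted(sorted(a)) == _distinct_sorted(sorted(b))
-- ===== Notes on version B (the rewrite author's own statement) =====
-- stated objective: alternative
-- what changed: Replaces A's dict-of-sets grouping and set cardinalities by sort-then-scan: B sorts the zipped pairs by key and checks adjacent pairs for a second value under the same key, and counts distinct elements of a and b by sorting each list and counting adjacent changes — no dicts or sets at all.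
import Mathlib
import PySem

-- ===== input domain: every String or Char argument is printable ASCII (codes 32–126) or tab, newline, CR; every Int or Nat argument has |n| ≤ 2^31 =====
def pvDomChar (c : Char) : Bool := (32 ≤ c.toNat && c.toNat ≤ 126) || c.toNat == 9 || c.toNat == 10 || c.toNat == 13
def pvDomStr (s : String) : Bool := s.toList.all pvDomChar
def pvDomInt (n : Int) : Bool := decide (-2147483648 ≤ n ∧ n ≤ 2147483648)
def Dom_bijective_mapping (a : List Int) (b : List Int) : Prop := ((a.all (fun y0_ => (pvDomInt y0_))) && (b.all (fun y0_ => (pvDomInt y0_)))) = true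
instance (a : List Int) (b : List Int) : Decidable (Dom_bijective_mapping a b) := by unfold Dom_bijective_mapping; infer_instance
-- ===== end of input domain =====

-- B replaces A's dict-of-sets grouping and set cardinalities by sort-then-scan: sort the
-- zipped pairs by key and check adjacent pairs, count distinct values of a/b by sorting
-- and counting adjacent changes (no dicts or sets at all).

-- ===== PORT A =====
def bijective_mapping (a : List Int) (b : List Int) : Bool :=
  let mapping : PySem.Dict Int (PySem.Set Int) :=
    (a.zip b).foldl (fun d p => d.modify p.1 PySem.Set.empty (fun s => PySem.Set.add s p.2)) PySem.Dict.empty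
  let a_values : PySem.Set Int := PySem.Set.ofList a
  let b_values : PySem.Set Int := PySem.Set.ofList b
  let matching_cardinality : Bool := a_values.length == b_values.length
  let mappings_are_one_to_one : Bool := (mapping.values.map (fun l => l.length == 1)).all id
  matching_cardinality && mappings_are_one_to_one

-- ===== PORT B =====
-- _distinct_sorted(xs) = len(xs) - sum(1 for p, q in zip(xs, xs[1:]) if p == q)
def pvDistinctSorted (xs : List Int) : Int :=
  (xs.length : Int) - (((xs.zip (PySem.List.slice xs (some 1) none)).filter (fun pq => pq.1 == pq.2)).length : Int)

def bijective_mapping_alt (a : List Int) (b : List Int) : Bool :=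
  let pairs := PySem.List.sorted (a.zip b) Prod.fst false
  let one_to_one : Bool := ((pairs.zip (PySem.List.slice pairs (some 1) none)).map
      (fun pq => pq.1.1 != pq.2.1 || pq.1.2 == pq.2.2)).all id
  one_to_one &&
    (pvDistinctSorted (PySem.List.sorted a (fun x => x) false)
      == pvDistinctSorted (PySem.List.sorted b (fun x => x) false))

-- ===== PRECONDITION & SPEC =====
def Spec_bijective_mapping (a : List Int) (b : List Int) (out : Bool) : Prop := out = bijective_mapping_alt a b
instance (a : List Int) (b : List Int) (out : Bool) : Decidable (Spec_bijective_mapping a b out) := by unfold Spec_bijective_mapping; infer_instance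

-- ===== CLAIM (what is proved, stated in full; the proofs are below) =====
def Claim_equal_bijective_mapping : Prop := ∀ (a : List Int) (b : List Int), Dom_bijective_mapping a b → Spec_bijective_mapping a b (bijective_mapping a b)

-- ===== LEMMAS AND PROOFS =====

-- Both one-to-one tests are characterised by the functional property of the zipped pairs.
def pvFunc (z : List (Int × Int)) : Prop := ∀ p ∈ z, ∀ q ∈ z, p.1 = q.1 → p.2 = q.2

theorem pv_getD_fold (z : List (Int × Int)) (d : PySem.Dict Int (PySem.Set Int)) (k : Int) :
    ((z.foldl (fun d p => d.modify p.1 PySem.Set.empty (fun s => PySem.Set.add s p.2)) d).getD k PySem.Set.empty)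
      = PySem.Set.update (d.getD k PySem.Set.empty) ((z.filter (fun p => p.1 == k)).map Prod.snd) := by
  induction z generalizing d with
  | nil => simp [PySem.Set.update]
  | cons p z ih =>
    rw [List.foldl_cons, ih, PySem.Dict.getD_modify]
    by_cases h : p.1 = k
    · simp [h, PySem.Set.update_cons]
    · simp [h, Ne.symm h]

theorem pv_ofList_all_eq {l : List Int} {v : Int} (hne : l ≠ []) (h : ∀ x ∈ l, x = v) :
    PySem.Set.ofList l = [v] := by
  obtain ⟨x, t, rfl⟩ := List.exists_cons_of_ne_nil hne
  have hx : x = v := h x (by simp)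
  subst hx
  have h0 : PySem.Set.ofList (x :: t) = PySem.Set.update (PySem.Set.add ([] : PySem.Set Int) x) t := rfl
  have hadd : PySem.Set.add ([] : PySem.Set Int) x = [x] := rfl
  rw [h0, hadd, PySem.Set.update_eq_append_filter]
  have hf : (PySem.Set.ofList t).filter (fun y => !(PySem.Set.contains [x] y)) = [] := by
    rw [List.filter_eq_nil_iff]
    intro y hy
    rw [PySem.Set.mem_ofList] at hy
    have : y = x := h y (List.mem_cons_of_mem x hy)
    simp [this, PySem.Set.contains]
  rw [hf]
  simp

-- A's one-to-one test holds iff the zipped pairs are functional.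
theorem pvA_iff (z : List (Int × Int)) :
    ((((z.foldl (fun d p => d.modify p.1 PySem.Set.empty (fun s => PySem.Set.add s p.2)) PySem.Dict.empty).values.map
        (fun l => l.length == 1)).all id) = true) ↔ pvFunc z := by
  set F := (z.foldl (fun d p => d.modify p.1 PySem.Set.empty (fun s => PySem.Set.add s p.2)) PySem.Dict.empty) with hF
  have hnd : F.keys.Nodup := PySem.Dict.nodup_keys_foldl_modify_key z Prod.fst PySem.Set.empty
      (fun _ p => fun s => PySem.Set.add s p.2) PySem.Dict.empty (by simp)
  have hkeys : F.keys = PySem.Set.ofList (z.map Prod.fst) := by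
    rw [hF, PySem.Dict.keys_foldl_modify_key]
    simp [PySem.Set.update_nil_left]
  have hvals : F.values = F.keys.map (fun k => F.getD k PySem.Set.empty) :=
    PySem.Dict.values_eq_map_keys F hnd PySem.Set.empty
  rw [hvals, List.map_map, List.all_map, List.all_eq_true]
  have hgetD : ∀ k, F.getD k PySem.Set.empty
      = PySem.Set.ofList ((z.filter (fun p => p.1 == k)).map Prod.snd) := by
    intro k
    rw [hF, pv_getD_fold]
    simp [PySem.Set.update_nil_left]
  constructor
  · intro hall p hp q hq hpq
    have hk : p.1 ∈ F.keys := by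
      rw [hkeys, PySem.Set.mem_ofList]
      exact List.mem_map_of_mem hp
    have h1 := hall p.1 hk
    simp only [Function.comp, hgetD, id, beq_iff_eq] at h1
    obtain ⟨v, hv⟩ := List.length_eq_one_iff.mp h1
    have hmem : ∀ r ∈ z, r.1 = p.1 → r.2 = v := by
      intro r hr hr1
      have hmm : r.2 ∈ PySem.Set.ofList ((z.filter (fun p' => p'.1 == p.1)).map Prod.snd) := by
        rw [PySem.Set.mem_ofList]
        exact List.mem_map_of_mem (List.mem_filter.mpr ⟨hr, by simp [hr1]⟩)
      rw [hv] at hmm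
      simpa using hmm
    rw [hmem p hp rfl, hmem q hq hpq.symm]
  · intro hfun k hk
    simp only [Function.comp, hgetD, id, beq_iff_eq]
    rw [hkeys, PySem.Set.mem_ofList] at hk
    obtain ⟨p, hp, hp1⟩ := List.mem_map.mp hk
    have hone : PySem.Set.ofList ((z.filter (fun p' => p'.1 == k)).map Prod.snd) = [p.2] := by
      apply pv_ofList_all_eq
      · have : p.2 ∈ (z.filter (fun p' => p'.1 == k)).map Prod.snd :=
          List.mem_map_of_mem (List.mem_filter.mpr ⟨hp, by simp [hp1]⟩)
        exact List.ne_nil_of_mem this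
      · intro x hx
        obtain ⟨q, hq, hq2⟩ := List.mem_map.mp hx
        have hq' := List.mem_filter.mp hq
        have hq1 : q.1 = p.1 := by
          have := hq'.2
          simp at this
          omega
        rw [← hq2]
        exact hfun q hq'.1 p hp hq1
    rw [hone]
    rfl

-- the adjacent-pair scan is the Chain' of the step relation
theorem pv_allzip (l : List (Int × Int)) :
    (((l.zip l.tail).map (fun pq => pq.1.1 != pq.2.1 || pq.1.2 == pq.2.2)).all id = true)
      ↔ List.IsChain (fun p q : Int × Int => p.1 = q.1 → p.2 = q.2) l := by
  induction l with
  | nil => simp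
  | cons p t ih =>
    cases t with
    | nil => simp
    | cons r t' =>
      rw [List.isChain_cons_cons, ← ih]
      simp only [List.tail_cons, List.zip_cons_cons, List.map_cons, List.all_cons,
        Bool.and_eq_true, id, Bool.or_eq_true, bne_iff_ne, beq_iff_eq]
      constructor
      · rintro ⟨h1, h2⟩; exact ⟨by tauto, h2⟩
      · rintro ⟨h1, h2⟩; exact ⟨by tauto, h2⟩

theorem pvFunc_tail {p : Int × Int} {t : List (Int × Int)} (h : pvFunc (p :: t)) : pvFunc t :=
  fun x hx y hy => h x (List.mem_cons_of_mem p hx) y (List.mem_cons_of_mem p hy)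

-- sorted by key + adjacent consistency ⇒ functional
theorem pv_chain_func (l : List (Int × Int))
    (hp : l.Pairwise (fun p q : Int × Int => p.1 ≤ q.1))
    (hc : List.IsChain (fun p q : Int × Int => p.1 = q.1 → p.2 = q.2) l) : pvFunc l := by
  induction l with
  | nil => intro p hp'; simp at hp'
  | cons p t ih =>
    have hpt := List.Pairwise.of_cons hp
    have hct : List.IsChain (fun p q : Int × Int => p.1 = q.1 → p.2 = q.2) t := by
      cases t with
      | nil => exact List.isChain_nil
      | cons r t' => exact (List.isChain_cons_cons.mp hc).2
    have hft : pvFunc t := ih hpt hct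
    have hkey : ∀ q ∈ t, q.1 = p.1 → q.2 = p.2 := by
      cases t with
      | nil => intro q hq; simp at hq
      | cons r t' =>
        have hCpr : p.1 = r.1 → p.2 = r.2 := (List.isChain_cons_cons.mp hc).1
        have hple : ∀ q ∈ r :: t', p.1 ≤ q.1 := by
          intro q hq
          exact (List.pairwise_cons.mp hp).1 q hq
        have hrle : ∀ q ∈ t', r.1 ≤ q.1 := by
          intro q hq
          exact (List.pairwise_cons.mp hpt).1 q hq
        intro q hq hq1
        rcases List.mem_cons.mp hq with rfl | hq'
        · exact (hCpr hq1.symm).symm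
        · have hr1 : r.1 = p.1 := by
            have h1 := hple r (List.mem_cons_self)
            have h2 := hrle q hq'
            omega
          have hp2 : p.2 = r.2 := hCpr hr1.symm
          have : q.2 = r.2 := hft q (List.mem_cons_of_mem r hq') r List.mem_cons_self (by omega)
          omega
    intro x hx y hy hxy
    rcases List.mem_cons.mp hx with rfl | hx' <;> rcases List.mem_cons.mp hy with h | hy'
    · rw [h]
    · exact (hkey y hy' (by omega)).symm
    · subst h; exact hkey x hx' hxy
    · exact hft x hx' y hy' hxy

theorem pv_func_chain (l : List (Int × Int)) (hf : pvFunc l) :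
    List.IsChain (fun p q : Int × Int => p.1 = q.1 → p.2 = q.2) l := by
  induction l with
  | nil => exact List.isChain_nil
  | cons p t ih =>
    cases t with
    | nil => exact List.isChain_singleton p
    | cons r t' =>
      refine List.isChain_cons_cons.mpr ⟨?_, ih (pvFunc_tail hf)⟩
      intro h1
      exact hf p List.mem_cons_self r (List.mem_cons_of_mem p List.mem_cons_self) h1

-- B's one-to-one test holds iff the zipped pairs are functional.
theorem pvB_iff (z : List (Int × Int)) :
    ((((PySem.List.sorted z Prod.fst false).zip
        (PySem.List.slice (PySem.List.sorted z Prod.fst false) (some 1) none)).map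
        (fun pq => pq.1.1 != pq.2.1 || pq.1.2 == pq.2.2)).all id = true) ↔ pvFunc z := by
  rw [PySem.List.slice_from_one, pv_allzip]
  have hmem : ∀ p : Int × Int, p ∈ PySem.List.sorted z Prod.fst false ↔ p ∈ z := by
    intro p; exact PySem.List.mem_sorted z Prod.fst false p
  have hfe : pvFunc (PySem.List.sorted z Prod.fst false) ↔ pvFunc z := by
    constructor
    · intro h p hp q hq; exact h p ((hmem p).mpr hp) q ((hmem q).mpr hq)
    · intro h p hp q hq; exact h p ((hmem p).mp hp) q ((hmem q).mp hq)
  constructor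
  · intro hc
    exact hfe.mp (pv_chain_func _ (PySem.List.sorted_pairwise z Prod.fst) hc)
  · intro h
    exact pv_func_chain _ (hfe.mpr h)

-- the distinct count of a ≤-sorted list is the number of adjacent changes (Nat form)
theorem pv_adj_count (ys : List Int) (hp : ys.Pairwise (· ≤ ·)) :
    ((ys.zip ys.tail).filter (fun pq => pq.1 == pq.2)).length + ys.toFinset.card = ys.length := by
  induction ys with
  | nil => simp
  | cons x t ih =>
    cases t with
    | nil => simp
    | cons y t' =>
      have hpt := List.Pairwise.of_cons hp
      have iht := ih hpt
      simp only [List.tail_cons, List.zip_cons_cons, List.filter_cons, List.length_cons] at iht ⊢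
      by_cases hxy : x = y
      · have hxmem : x ∈ (y :: t').toFinset := by simp [hxy]
        rw [List.toFinset_cons, Finset.insert_eq_self.mpr hxmem]
        simp only [hxy, beq_self_eq_true, if_true, List.length_cons]
        omega
      · have hxn : x ∉ (y :: t').toFinset := by
          simp only [List.mem_toFinset]
          intro hmem
          have hxy2 : x ≤ y := (List.pairwise_cons.mp hp).1 y List.mem_cons_self
          rcases List.mem_cons.mp hmem with rfl | hq'
          · exact hxy rfl
          · have hyx := (List.pairwise_cons.mp hpt).1 x hq'
            exact hxy (by omega)
        rw [List.toFinset_cons, Finset.card_insert_of_notMem hxn]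
        simp only [beq_iff_eq, hxy, if_false]
        omega

theorem pv_ds_sorted (ys : List Int) (hp : ys.Pairwise (· ≤ ·)) :
    pvDistinctSorted ys = (ys.toFinset.card : Int) := by
  unfold pvDistinctSorted
  rw [PySem.List.slice_from_one]
  have h := pv_adj_count ys hp
  omega

theorem pv_setlen (xs : List Int) : (PySem.Set.ofList xs).length = xs.toFinset.card := by
  rw [← List.toFinset_card_of_nodup (PySem.Set.nodup_ofList xs)]
  congr 1
  ext x
  simp [PySem.Set.mem_ofList]

theorem pv_ds_eq (xs : List Int) :
    pvDistinctSorted (PySem.List.sorted xs (fun x => x) false) = (xs.toFinset.card : Int) := by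
  rw [pv_ds_sorted _ (by simpa using PySem.List.sorted_pairwise xs (fun x : Int => x))]
  exact congrArg (fun c : Nat => (c : Int))
    (congrArg Finset.card (List.toFinset_eq_of_perm _ _ (PySem.List.sorted_perm xs (fun x : Int => x) false)))

-- ===== VERDICT (by name: the statement is the Claim_ definition above) =====
theorem bijective_mapping_spec : Claim_equal_bijective_mapping := by
  intro a b _
  unfold Spec_bijective_mapping bijective_mapping bijective_mapping_alt
  simp only []
  have h1 : ((((a.zip b).foldl (fun d p => d.modify p.1 PySem.Set.empty (fun s => PySem.Set.add s p.2)) PySem.Dict.empty).values.map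
        (fun l => l.length == 1)).all id)
      = ((((PySem.List.sorted (a.zip b) Prod.fst false).zip
        (PySem.List.slice (PySem.List.sorted (a.zip b) Prod.fst false) (some 1) none)).map
        (fun pq => pq.1.1 != pq.2.1 || pq.1.2 == pq.2.2)).all id) :=
    Bool.coe_iff_coe.mp ((pvA_iff (a.zip b)).trans (pvB_iff (a.zip b)).symm)
  have h2 : (((PySem.Set.ofList a).length) == ((PySem.Set.ofList b).length))
      = (pvDistinctSorted (PySem.List.sorted a (fun x => x) false)
          == pvDistinctSorted (PySem.List.sorted b (fun x => x) false)) := by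
    rw [pv_ds_eq, pv_ds_eq, pv_setlen, pv_setlen]
    apply Bool.coe_iff_coe.mp
    simp
  rw [h1, h2, Bool.and_comm]
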